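-- pv_equiv track=rewrite | github.com/anindameister/Argumentative-agents-for-ethical-regulation-of-urban-transportation-network | PythonProgramWithHardCodedInput.py | acceptibility
-- ===== SOURCE A (Python) =====
-- def acceptibility(arguments,attackRelationList,subsetList):
--
--
--     attackers = []
--     for a in subsetList:
--         for r in attackRelationList:
--             if r[1] == a and not r[0] in attackers:
--                 attackers.append(r[0])
--     for a in attackers:
--         notFound = True
--         for r in attackRelationList:
--             if r[1] == a and r[0] in subsetList:
--                 notFound = False
--                 break
--         if notFound:
--             return False
--     return True
-- ===== SOURCE B (Python) =====
-- def acceptibility(arguments, attackRelationList, subsetList):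
--     subset = set(subsetList)
--     attackers = {s for (s, t) in attackRelationList if t in subset}
--     counterattacked = {t for (s, t) in attackRelationList if s in subset}
--     return attackers <= counterattacked
-- ===== Notes on version B (the rewrite author's own statement) =====
-- stated objective: faster
-- what changed: Replaces the quadratic attacker-list construction and per-attacker rescan of the relation with two set comprehensions over the relation (attackers of the subset, targets counterattacked by the subset) and one subset inclusion test.
import Mathlib
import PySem

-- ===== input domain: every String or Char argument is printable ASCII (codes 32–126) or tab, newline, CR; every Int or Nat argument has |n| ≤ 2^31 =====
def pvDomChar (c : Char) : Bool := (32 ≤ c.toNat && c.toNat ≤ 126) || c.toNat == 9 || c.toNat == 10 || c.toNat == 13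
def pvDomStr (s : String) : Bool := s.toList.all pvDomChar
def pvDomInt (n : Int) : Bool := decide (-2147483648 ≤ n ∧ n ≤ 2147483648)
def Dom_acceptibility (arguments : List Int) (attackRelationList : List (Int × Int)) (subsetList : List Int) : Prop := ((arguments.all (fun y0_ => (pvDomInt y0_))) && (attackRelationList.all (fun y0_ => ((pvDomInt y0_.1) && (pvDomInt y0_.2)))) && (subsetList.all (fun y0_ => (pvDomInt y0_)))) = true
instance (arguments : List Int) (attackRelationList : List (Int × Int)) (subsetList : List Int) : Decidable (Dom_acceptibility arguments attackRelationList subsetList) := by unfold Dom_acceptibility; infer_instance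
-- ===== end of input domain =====

-- B replaces A's quadratic attacker-list construction and per-attacker rescan of the relation
-- with two set comprehensions over the relation and one subset-inclusion test (objective: faster).

-- ===== PORT A =====
def acceptibility (arguments : List Int) (attackRelationList : List (Int × Int)) (subsetList : List Int) : Bool :=
  -- attackers = []; for a in subsetList: for r in attackRelationList: if r[1]==a and r[0] not in attackers: attackers.append(r[0])
  let attackers : List Int := subsetList.foldl (fun acc a =>
    attackRelationList.foldl (fun acc r =>
      if r.2 == a && !(acc.contains r.1) then acc ++ [r.1] else acc) acc) []
  -- for a in attackers: notFound = True; for r in ...: if r[1]==a and r[0] in subsetList: notFound=False; break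
  -- if notFound: return False;  return True
  attackers.all (fun a =>
    attackRelationList.any (fun r => r.2 == a && subsetList.contains r.1))

-- ===== PORT B =====
def acceptibility_alt (arguments : List Int) (attackRelationList : List (Int × Int)) (subsetList : List Int) : Bool :=
  let subset : PySem.Set Int := PySem.Set.ofList subsetList
  let attackers : PySem.Set Int :=
    PySem.Set.ofList ((attackRelationList.filter (fun r => PySem.Set.contains subset r.2)).map Prod.fst)
  let counterattacked : PySem.Set Int :=
    PySem.Set.ofList ((attackRelationList.filter (fun r => PySem.Set.contains subset r.1)).map Prod.snd)
  PySem.Set.issubset attackers counterattacked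

-- ===== PRECONDITION & SPEC =====
def Spec_acceptibility (arguments : List Int) (attackRelationList : List (Int × Int)) (subsetList : List Int) (out : Bool) : Prop := out = acceptibility_alt arguments attackRelationList subsetList
instance (arguments : List Int) (attackRelationList : List (Int × Int)) (subsetList : List Int) (out : Bool) : Decidable (Spec_acceptibility arguments attackRelationList subsetList out) := by unfold Spec_acceptibility; infer_instance

-- ===== CLAIM (what is proved, stated in full; the proofs are below) =====
def Claim_equal_acceptibility : Prop := ∀ (arguments : List Int) (attackRelationList : List (Int × Int)) (subsetList : List Int), Dom_acceptibility arguments attackRelationList subsetList → Spec_acceptibility arguments attackRelationList subsetList (acceptibility arguments attackRelationList subsetList)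

-- ===== LEMMAS AND PROOFS =====

-- membership in A's inner accumulation loop over the relation (fixed subset element a)
lemma pv_mem_inner (R : List (Int × Int)) (a x : Int) (acc : List Int) :
    (x ∈ R.foldl (fun acc r =>
      if r.2 == a && !(acc.contains r.1) then acc ++ [r.1] else acc) acc) ↔
    x ∈ acc ∨ ∃ r ∈ R, r.2 = a ∧ r.1 = x := by
  induction R generalizing acc with
  | nil => simp
  | cons r rs ih =>
    simp only [List.foldl_cons]
    rw [ih]
    by_cases h2 : r.2 = a <;> by_cases hc : r.1 ∈ acc <;>
      simp [h2, hc, List.mem_append] <;> aesop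

-- membership in A's attackers list
lemma pv_mem_attackers (R : List (Int × Int)) (S : List Int) (acc : List Int) (x : Int) :
    (x ∈ S.foldl (fun acc a =>
      R.foldl (fun acc r =>
        if r.2 == a && !(acc.contains r.1) then acc ++ [r.1] else acc) acc) acc) ↔
    x ∈ acc ∨ ∃ r ∈ R, r.1 = x ∧ r.2 ∈ S := by
  induction S generalizing acc with
  | nil => simp
  | cons a as ih =>
    simp only [List.foldl_cons]
    rw [ih, pv_mem_inner]
    constructor
    · rintro ((h | ⟨r, hr, h2, h1⟩) | ⟨r, hr, h1, h2⟩)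
      · exact Or.inl h
      · exact Or.inr ⟨r, hr, h1, by simp [h2]⟩
      · exact Or.inr ⟨r, hr, h1, by simp [h2]⟩
    · rintro (h | ⟨r, hr, h1, h2⟩)
      · exact Or.inl (Or.inl h)
      · rcases List.mem_cons.mp h2 with h2 | h2
        · exact Or.inl (Or.inr ⟨r, hr, h2, h1⟩)
        · exact Or.inr ⟨r, hr, h1, h2⟩

-- A returns true iff every attacker of the subset is counterattacked by the subset
lemma pv_A_iff (arguments : List Int) (R : List (Int × Int)) (S : List Int) :
    acceptibility arguments R S = true ↔
    (∀ x, (∃ r ∈ R, r.1 = x ∧ r.2 ∈ S) → ∃ r ∈ R, r.2 = x ∧ r.1 ∈ S) := by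
  unfold acceptibility
  rw [List.all_eq_true]
  constructor
  · intro h x hx
    have := h x ((pv_mem_attackers R S [] x).mpr (Or.inr hx))
    simpa [List.any_eq_true, Bool.and_eq_true, List.contains_iff_mem] using this
  · intro h a ha
    rcases (pv_mem_attackers R S [] a).mp ha with h0 | hx
    · simp at h0
    · have := h a hx
      simpa [List.any_eq_true, Bool.and_eq_true, List.contains_iff_mem] using this

-- B returns true iff the same inclusion holds
lemma pv_B_iff (arguments : List Int) (R : List (Int × Int)) (S : List Int) :
    acceptibility_alt arguments R S = true ↔
    (∀ x, (∃ r ∈ R, r.1 = x ∧ r.2 ∈ S) → ∃ r ∈ R, r.2 = x ∧ r.1 ∈ S) := by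
  unfold acceptibility_alt
  simp only [PySem.Set.issubset_iff, PySem.Set.mem_ofList, List.mem_map, List.mem_filter,
    PySem.Set.contains_iff, Bool.and_eq_true]
  constructor
  · rintro h x ⟨r, hr, h1, h2⟩
    rcases h x ⟨r, ⟨hr, h2⟩, h1⟩ with ⟨r', ⟨hr', hs⟩, h2'⟩
    exact ⟨r', hr', h2', hs⟩
  · rintro h x ⟨r, ⟨hr, h2⟩, h1⟩
    rcases h x ⟨r, hr, h1, h2⟩ with ⟨r', hr', h2', hs⟩
    exact ⟨r', ⟨hr', hs⟩, h2'⟩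

-- ===== VERDICT (by name: the statement is the Claim_ definition above) =====
theorem acceptibility_spec : Claim_equal_acceptibility := by
  intro arguments R S _
  unfold Spec_acceptibility
  rw [Bool.eq_iff_iff, pv_A_iff, pv_B_iff]
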